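-- pv_equiv track=rewrite | github.com/agent0ai/a0-connector | src/agent_zero_cli/profile_commands.py | resolve_profile_selection
-- ===== SOURCE A (Python) =====
-- from typing import TYPE_CHECKING, Any, Mapping, Sequence
--
-- ProfileOption = dict[str, str]
--
-- def _normalize_profile_match(value: str) -> str:
--     return " ".join(value.strip().casefold().split())
--
-- def profile_label(options: Sequence[Mapping[str, object]], profile_key: str) -> str:
--     normalized_key = profile_key.strip()
--     if not normalized_key:
--         return ""
--
--     for option in options:
--         key = str(option.get("key") or option.get("value") or "").strip()
--         if key != normalized_key:
--             continue
--         label = str(option.get("label") or key).strip()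
--         return label or normalized_key
--     return normalized_key
--
-- def resolve_profile_selection(
--     options: Sequence[Mapping[str, object]],
--     query: str,
-- ) -> tuple[ProfileOption | None, str | None]:
--     normalized_query = _normalize_profile_match(query)
--     if not normalized_query:
--         return None, "Choose an agent profile first."
--
--     exact_key_matches: list[ProfileOption] = []
--     exact_label_matches: list[ProfileOption] = []
--     prefix_matches: list[ProfileOption] = []
--
--     for option in options:
--         key = str(option.get("key") or "").strip()
--         label = str(option.get("label") or key).strip() or key
--         if not key:
--             continue
--
--         normalized_option = {"key": key, "label": label}
--         normalized_key = _normalize_profile_match(key)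
--         normalized_label = _normalize_profile_match(label)
--
--         if normalized_key == normalized_query:
--             exact_key_matches.append(normalized_option)
--             continue
--         if normalized_label == normalized_query:
--             exact_label_matches.append(normalized_option)
--             continue
--         if normalized_key.startswith(normalized_query) or normalized_label.startswith(normalized_query):
--             prefix_matches.append(normalized_option)
--
--     if exact_key_matches:
--         return exact_key_matches[0], None
--     if len(exact_label_matches) == 1:
--         return exact_label_matches[0], None
--     if len(prefix_matches) == 1:
--         return prefix_matches[0], None
--
--     if len(exact_label_matches) > 1 or len(prefix_matches) > 1:
--         matches = exact_label_matches if len(exact_label_matches) > 1 else prefix_matches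
--         labels = ", ".join(profile_label(matches, option["key"]) for option in matches[:6])
--         suffix = "..." if len(matches) > 6 else ""
--         return None, f"Profile '{query.strip()}' is ambiguous. Matches: {labels}{suffix}"
--
--     available = ", ".join(
--         option["key"]
--         for option in options[:8]
--         if str(option.get("key") or "").strip()
--     )
--     suffix = ", ..." if len(options) > 8 else ""
--     return None, f"Unknown profile: {query.strip()}. Available profiles: {available}{suffix}"
-- ===== SOURCE B (Python) =====
-- def _normalize_profile_match(value: str) -> str:
--     return " ".join(value.strip().casefold().split())
--
--
-- def profile_label(options, profile_key: str) -> str: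
--     normalized_key = profile_key.strip()
--     if not normalized_key:
--         return ""
--     for option in options:
--         key = str(option.get("key") or option.get("value") or "").strip()
--         if key != normalized_key:
--             continue
--         label = str(option.get("label") or key).strip()
--         return label or normalized_key
--     return normalized_key
--
--
-- def resolve_profile_selection(options, query):
--     normalized_query = _normalize_profile_match(query)
--     if not normalized_query:
--         return None, "Choose an agent profile first."
--
--     # One pass building normalized entries; matching is done by short-circuiting
--     # priority passes over this small list instead of a three-bucket classification.
--     entries = []
--     for option in options:
--         key = str(option.get("key") or "").strip()
--         if not key:
--             continue
--         label = str(option.get("label") or key).strip() or key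
--         entries.append(({"key": key, "label": label},
--                         _normalize_profile_match(key),
--                         _normalize_profile_match(label)))
--
--     hit = next((opt for opt, nk, _ in entries if nk == normalized_query), None)
--     if hit is not None:
--         return hit, None
--
--     label_matches = [opt for opt, _, nl in entries if nl == normalized_query]
--     if len(label_matches) == 1:
--         return label_matches[0], None
--
--     prefix_matches = [opt for opt, nk, nl in entries
--                       if nl != normalized_query
--                       and (nk.startswith(normalized_query)
--                            or nl.startswith(normalized_query))]
--     if len(prefix_matches) == 1:
--         return prefix_matches[0], None
--
--     if len(label_matches) > 1 or len(prefix_matches) > 1: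
--         matches = label_matches if len(label_matches) > 1 else prefix_matches
--         labels = ", ".join(profile_label(matches, opt["key"]) for opt in matches[:6])
--         suffix = "..." if len(matches) > 6 else ""
--         return None, f"Profile '{query.strip()}' is ambiguous. Matches: {labels}{suffix}"
--
--     available = ", ".join(
--         option["key"]
--         for option in options[:8]
--         if str(option.get("key") or "").strip()
--     )
--     suffix = ", ..." if len(options) > 8 else ""
--     return None, f"Unknown profile: {query.strip()}. Available profiles: {available}{suffix}"
-- ===== Notes on version B (the rewrite author's own statement) =====
-- stated objective: alternative
-- what changed: A classifies every option into three match buckets in a single three-accumulator loop; B builds a normalized (option, key, label) entry list in one pass and then resolves by short-circuiting priority passes over it: first exact-key hit via next(), then an exact-label filter, then a prefix filter, reusing the same count-based decision tree and message formatting.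
import Mathlib
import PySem

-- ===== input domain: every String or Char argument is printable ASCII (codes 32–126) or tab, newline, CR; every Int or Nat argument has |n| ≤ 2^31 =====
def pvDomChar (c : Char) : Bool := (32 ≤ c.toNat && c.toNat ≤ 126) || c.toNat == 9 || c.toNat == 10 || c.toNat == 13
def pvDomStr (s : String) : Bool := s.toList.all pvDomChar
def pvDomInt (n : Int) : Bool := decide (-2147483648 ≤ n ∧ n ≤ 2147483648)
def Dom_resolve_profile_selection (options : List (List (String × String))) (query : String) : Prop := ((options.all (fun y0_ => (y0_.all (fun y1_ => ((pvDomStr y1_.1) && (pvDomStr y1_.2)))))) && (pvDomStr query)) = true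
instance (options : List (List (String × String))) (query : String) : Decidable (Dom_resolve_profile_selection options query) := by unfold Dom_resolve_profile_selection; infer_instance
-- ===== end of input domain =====

-- B replaces A's one-pass three-bucket classification by a normalized-entry list scanned
-- in priority passes (first key hit, then label matches, then prefix matches); objective: alternative decomposition.


-- ===== PORT A =====
-- Python truthiness 'x or y' on Optional[str] (None and "" are falsy)
def pvOrS (o : Option String) (dflt : String) : String :=
  match o with
  | some s => if s = "" then dflt else s
  | none => dflt

-- 'option.get(k) or option.get(k2)' (first truthy, as an Option)
def pvOrO (a b : Option String) : Option String :=
  match a with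
  | some s => if s = "" then b else some s
  | none => b

-- _normalize_profile_match: " ".join(value.strip().casefold().split());
-- casefold = lower on the printable-ASCII domain Dom_ restricts to.
def pvNorm (value : String) : String :=
  PySem.Str.join " " (PySem.Str.split₀ (PySem.Str.lower (PySem.Str.strip value)))

-- key = str(option.get("key") or "").strip()
def pvOptKey (option : List (String × String)) : String :=
  PySem.Str.strip (pvOrS ((PySem.Dict.mk option).get? "key") "")

-- label = str(option.get("label") or key).strip() or key
def pvOptLabel (option : List (String × String)) (key : String) : String :=
  let l := PySem.Str.strip (pvOrS ((PySem.Dict.mk option).get? "label") key)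
  if l = "" then key else l

-- the for-loop of profile_label
def pvProfileLabelGo (options : List (List (String × String))) (nk : String) : String :=
  match options with
  | [] => nk
  | option :: rest =>
    let key := PySem.Str.strip (pvOrS (pvOrO ((PySem.Dict.mk option).get? "key") ((PySem.Dict.mk option).get? "value")) "")
    if key ≠ nk then pvProfileLabelGo rest nk
    else
      let label := PySem.Str.strip (pvOrS ((PySem.Dict.mk option).get? "label") key)
      if label = "" then nk else label

def pvProfileLabel (options : List (List (String × String))) (profile_key : String) : String :=
  let nk := PySem.Str.strip profile_key
  if nk = "" then "" else pvProfileLabelGo options nk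

-- the ambiguous / unknown-profile error strings (identical source text in A and in B)
def pvAmbiguousMsg (ms : List (List (String × String))) (query : String) : String :=
  let labels := PySem.Str.join ", "
    ((PySem.List.slice ms none (some 6)).map
      (fun o => pvProfileLabel ms (((PySem.Dict.mk o).get? "key").getD "")))
      -- option["key"]: every element of ms carries "key" by construction, so getD "" is exact
  let suffix := if ms.length > 6 then "..." else ""
  "Profile '" ++ PySem.Str.strip query ++ "' is ambiguous. Matches: " ++ labels ++ suffix

def pvUnknownMsg (options : List (List (String × String))) (query : String) : String :=
  let available := PySem.Str.join ", "
    ((PySem.List.slice options none (some 8)).filterMap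
      (fun o => if PySem.Str.strip (pvOrS ((PySem.Dict.mk o).get? "key") "") = "" then none
                else (PySem.Dict.mk o).get? "key"))
      -- 'option["key"] for option in options[:8] if str(option.get("key") or "").strip()':
      -- the guard guarantees "key" is present, so get? is some there and filterMap is exact
  let suffix := if options.length > 8 then ", ..." else ""
  "Unknown profile: " ++ PySem.Str.strip query ++ ". Available profiles: " ++ available ++ suffix

-- the body of A's classification loop (state = the three match buckets)
def pvStepA (q : String)
    (st : List (List (String × String)) × List (List (String × String)) × List (List (String × String)))
    (option : List (String × String)) :
    List (List (String × String)) × List (List (String × String)) × List (List (String × String)) :=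
  let key := pvOptKey option
  let label := pvOptLabel option key
  if key = "" then st
  else
    let nopt := [("key", key), ("label", label)]
    let nk := pvNorm key
    let nl := pvNorm label
    if nk = q then (st.1 ++ [nopt], st.2.1, st.2.2)
    else if nl = q then (st.1, st.2.1 ++ [nopt], st.2.2)
    else if PySem.Str.startswith nk q || PySem.Str.startswith nl q then
      (st.1, st.2.1, st.2.2 ++ [nopt])
    else st

def resolve_profile_selection (options : List (List (String × String))) (query : String) :
    (Option (List (String × String))) × Option String :=
  let q := pvNorm query
  if q = "" then (none, some "Choose an agent profile first.")
  else
    let st := options.foldl (pvStepA q) ([], [], [])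
    if st.1 ≠ [] then (PySem.List.pyGet? st.1 0, none)
    else if st.2.1.length = 1 then (PySem.List.pyGet? st.2.1 0, none)
    else if st.2.2.length = 1 then (PySem.List.pyGet? st.2.2 0, none)
    else if st.2.1.length > 1 ∨ st.2.2.length > 1 then
      let ms := if st.2.1.length > 1 then st.2.1 else st.2.2
      (none, some (pvAmbiguousMsg ms query))
    else (none, some (pvUnknownMsg options query))

-- ===== PORT B =====
-- the body of B's entry-building loop
def pvStepB (acc : List ((List (String × String)) × String × String))
    (option : List (String × String)) :
    List ((List (String × String)) × String × String) :=
  let key := pvOptKey option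
  if key = "" then acc
  else
    let label := pvOptLabel option key
    acc ++ [([("key", key), ("label", label)], pvNorm key, pvNorm label)]

def resolve_profile_selection_alt (options : List (List (String × String))) (query : String) :
    (Option (List (String × String))) × Option String :=
  let q := pvNorm query
  if q = "" then (none, some "Choose an agent profile first.")
  else
    let entries := options.foldl pvStepB []
    let hit := (entries.find? (fun e => e.2.1 == q)).map (·.1)
    if hit.isSome then (hit, none)
    else
      let label_matches := (entries.filter (fun e => e.2.2 == q)).map (·.1)
      if label_matches.length = 1 then (PySem.List.pyGet? label_matches 0, none)
      else
        let prefix_matches :=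
          (entries.filter (fun e =>
            (!(e.2.2 == q)) && (PySem.Str.startswith e.2.1 q || PySem.Str.startswith e.2.2 q))).map (·.1)
        if prefix_matches.length = 1 then (PySem.List.pyGet? prefix_matches 0, none)
        else if label_matches.length > 1 ∨ prefix_matches.length > 1 then
          let ms := if label_matches.length > 1 then label_matches else prefix_matches
          (none, some (pvAmbiguousMsg ms query))
        else (none, some (pvUnknownMsg options query))

-- ===== PRECONDITION & SPEC =====
def Spec_resolve_profile_selection (options : List (List (String × String))) (query : String) (out : (Option (List (String × String))) × Option String) : Prop := out = resolve_profile_selection_alt options query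
instance (options : List (List (String × String))) (query : String) (out : (Option (List (String × String))) × Option String) : Decidable (Spec_resolve_profile_selection options query out) := by unfold Spec_resolve_profile_selection; infer_instance

-- ===== CLAIM (what is proved, stated in full; the proofs are below) =====
def Claim_equal_resolve_profile_selection : Prop := ∀ (options : List (List (String × String))) (query : String), Dom_resolve_profile_selection options query → Spec_resolve_profile_selection options query (resolve_profile_selection options query)

-- ===== LEMMAS AND PROOFS =====

-- the normalized-entry list both algorithms are about (proof-side characterization)
def pvEntries (options : List (List (String × String))) : List ((List (String × String)) × String × String) :=
  options.filterMap (fun option =>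
    if pvOptKey option = "" then none
    else
      some ([("key", pvOptKey option), ("label", pvOptLabel option (pvOptKey option))],
            pvNorm (pvOptKey option), pvNorm (pvOptLabel option (pvOptKey option))))

theorem pvEntries_foldB (options : List (List (String × String)))
    (acc : List ((List (String × String)) × String × String)) :
    options.foldl pvStepB acc = acc ++ pvEntries options := by
  induction options generalizing acc with
  | nil => simp [pvEntries]
  | cons o rest ih =>
    rw [List.foldl_cons, ih]
    by_cases h : pvOptKey o = "" <;>
      simp [pvStepB, pvEntries, h]

def pvPk (q : String) (e : (List (String × String)) × String × String) : Bool := e.2.1 == q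
def pvPl (q : String) (e : (List (String × String)) × String × String) : Bool :=
  !(e.2.1 == q) && (e.2.2 == q)
def pvPp (q : String) (e : (List (String × String)) × String × String) : Bool :=
  !(e.2.1 == q) && !(e.2.2 == q) &&
    (PySem.Str.startswith e.2.1 q || PySem.Str.startswith e.2.2 q)

theorem pvEntries_foldA (q : String) (options : List (List (String × String)))
    (a b c : List (List (String × String))) :
    options.foldl (pvStepA q) (a, b, c) =
      (a ++ ((pvEntries options).filter (pvPk q)).map (·.1),
       b ++ ((pvEntries options).filter (pvPl q)).map (·.1),
       c ++ ((pvEntries options).filter (pvPp q)).map (·.1)) := by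
  induction options generalizing a b c with
  | nil => simp [pvEntries]
  | cons o rest ih =>
    rw [List.foldl_cons]
    by_cases hk : pvOptKey o = ""
    · rw [show pvStepA q (a, b, c) o = (a, b, c) from by simp [pvStepA, hk], ih]
      simp [pvEntries, hk]
    · have hent : pvEntries (o :: rest)
          = ([("key", pvOptKey o), ("label", pvOptLabel o (pvOptKey o))],
             pvNorm (pvOptKey o), pvNorm (pvOptLabel o (pvOptKey o))) :: pvEntries rest := by
        simp [pvEntries, hk]
      by_cases h1 : pvNorm (pvOptKey o) = q
      · have t1 : pvPk q ([("key", pvOptKey o), ("label", pvOptLabel o (pvOptKey o))],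
            pvNorm (pvOptKey o), pvNorm (pvOptLabel o (pvOptKey o))) = true := by
          simp only [pvPk]; simp [h1]
        have t2 : pvPl q ([("key", pvOptKey o), ("label", pvOptLabel o (pvOptKey o))],
            pvNorm (pvOptKey o), pvNorm (pvOptLabel o (pvOptKey o))) = false := by
          simp only [pvPl]; simp [h1]
        have t3 : pvPp q ([("key", pvOptKey o), ("label", pvOptLabel o (pvOptKey o))],
            pvNorm (pvOptKey o), pvNorm (pvOptLabel o (pvOptKey o))) = false := by
          simp only [pvPp]; simp [h1]
        rw [show pvStepA q (a, b, c) o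
            = (a ++ [[("key", pvOptKey o), ("label", pvOptLabel o (pvOptKey o))]], b, c) from by
              simp [pvStepA, hk, h1], ih, hent]
        simp [t1, t2, t3]
      · have e1 : (pvNorm (pvOptKey o) == q) = false := by simp [h1]
        by_cases h2 : pvNorm (pvOptLabel o (pvOptKey o)) = q
        · have t1 : pvPk q ([("key", pvOptKey o), ("label", pvOptLabel o (pvOptKey o))],
              pvNorm (pvOptKey o), pvNorm (pvOptLabel o (pvOptKey o))) = false := by
            simp only [pvPk]; simp [h1]
          have t2 : pvPl q ([("key", pvOptKey o), ("label", pvOptLabel o (pvOptKey o))],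
              pvNorm (pvOptKey o), pvNorm (pvOptLabel o (pvOptKey o))) = true := by
            simp only [pvPl]; simp [h1, h2]
          have t3 : pvPp q ([("key", pvOptKey o), ("label", pvOptLabel o (pvOptKey o))],
              pvNorm (pvOptKey o), pvNorm (pvOptLabel o (pvOptKey o))) = false := by
            simp only [pvPp]; simp [h2]
          rw [show pvStepA q (a, b, c) o
              = (a, b ++ [[("key", pvOptKey o), ("label", pvOptLabel o (pvOptKey o))]], c) from by
                simp [pvStepA, hk, h1, h2], ih, hent]
          simp [t1, t2, t3]
        · have e2 : (pvNorm (pvOptLabel o (pvOptKey o)) == q) = false := by simp [h2]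
          have t1 : pvPk q ([("key", pvOptKey o), ("label", pvOptLabel o (pvOptKey o))],
              pvNorm (pvOptKey o), pvNorm (pvOptLabel o (pvOptKey o))) = false := by
            simp only [pvPk]; simp [h1]
          have t2 : pvPl q ([("key", pvOptKey o), ("label", pvOptLabel o (pvOptKey o))],
              pvNorm (pvOptKey o), pvNorm (pvOptLabel o (pvOptKey o))) = false := by
            simp only [pvPl]; simp [h2]
          by_cases h3 : (PySem.Str.startswith (pvNorm (pvOptKey o)) q
              || PySem.Str.startswith (pvNorm (pvOptLabel o (pvOptKey o))) q) = true
          · have t3 : pvPp q ([("key", pvOptKey o), ("label", pvOptLabel o (pvOptKey o))],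
                pvNorm (pvOptKey o), pvNorm (pvOptLabel o (pvOptKey o))) = true := by
              simp only [pvPp, e1, e2, Bool.not_false, Bool.true_and]
              exact h3
            rw [show pvStepA q (a, b, c) o
                = (a, b, c ++ [[("key", pvOptKey o), ("label", pvOptLabel o (pvOptKey o))]]) from by
                  simp only [pvStepA]; rw [if_neg hk, if_neg h1, if_neg h2, if_pos h3], ih, hent]
            simp [t1, t2, t3]
          · rw [Bool.not_eq_true] at h3
            have t3 : pvPp q ([("key", pvOptKey o), ("label", pvOptLabel o (pvOptKey o))],
                pvNorm (pvOptKey o), pvNorm (pvOptLabel o (pvOptKey o))) = false := by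
              simp only [pvPp, e1, e2, Bool.not_false, Bool.true_and]
              exact h3
            rw [show pvStepA q (a, b, c) o = (a, b, c) from by
                  simp only [pvStepA]
                  rw [if_neg hk, if_neg h1, if_neg h2, if_neg (by rw [h3]; exact Bool.false_ne_true)], ih, hent]
            simp [t1, t2, t3]

-- ===== VERDICT (by name: the statement is the Claim_ definition above) =====
theorem resolve_profile_selection_spec : Claim_equal_resolve_profile_selection := by
  intro options query _
  unfold Spec_resolve_profile_selection resolve_profile_selection resolve_profile_selection_alt
  by_cases hq : pvNorm query = ""
  · simp [hq]
  · simp only [hq, if_false, pvEntries_foldA, pvEntries_foldB, List.nil_append]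
    set q := pvNorm query with hqdef
    set E := pvEntries options with hE
    cases h : E.filter (pvPk q) with
    | cons x t =>
      -- an exact key match exists: both return the first one
      have hfind : E.find? (fun e => e.2.1 == q) = some x := by
        rw [show (fun e => e.2.1 == q) = pvPk q from rfl, ← List.head?_filter, h]; rfl
      simp [hfind]
    | nil =>
      -- no exact key match: find? = none, and the label/prefix filters coincide
      have hnone : E.find? (fun e => e.2.1 == q) = none := by
        rw [show (fun e => e.2.1 == q) = pvPk q from rfl, ← List.head?_filter, h]; rfl
      have hallk : ∀ e ∈ E, (e.2.1 == q) = false := by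
        intro e he
        simpa [pvPk] using List.filter_eq_nil_iff.mp h e he
      have hlab : E.filter (pvPl q) = E.filter (fun e => e.2.2 == q) := by
        apply List.filter_congr
        intro e he; simp [pvPl, hallk e he]
      have hpre : E.filter (pvPp q) = E.filter (fun e =>
          (!(e.2.2 == q)) && (PySem.Str.startswith e.2.1 q || PySem.Str.startswith e.2.2 q)) := by
        apply List.filter_congr
        intro e he; simp [pvPp, hallk e he]
      rw [hlab, hpre]
      simp [hnone]
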